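-- pv_equiv track=rewrite | github.com/reuseman/zhou | dataset_generator.py | compute_unimol_entropy
-- ===== SOURCE A (Python) =====
-- def compute_unimol_entropy(bpm_list):
--     # Stable BPMs are labeled as 1
--     for i in range(0, len(bpm_list)):
--         if bpm_list[i] <= 50:
--             bpm_list[i] = 0
--         elif bpm_list[i] >= 120:
--             bpm_list[i] = 2
--         else:
--             bpm_list[i] = 1
--
--     unimol_entropy = list()
--
--     # Count the number of 1s in a window of 10 elements
--     for i in range(9, len(bpm_list)):
--         start_index = i - 9
--         end_index = i
--         entropy = bpm_list[start_index : end_index + 1].count(1)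
--         unimol_entropy.append(entropy)
--
--     return unimol_entropy
-- ===== SOURCE B (Python) =====
-- def compute_unimol_entropy(bpm_list):
--     # Return-value equivalent to A (A also relabels bpm_list in place; B leaves it untouched).
--     # Incremental sliding window: O(n) single pass instead of re-slicing a 10-window each step.
--     stable = [1 if 50 < b < 120 else 0 for b in bpm_list]
--     if len(stable) < 10:
--         return []
--     cur = sum(stable[:10])
--     out = [cur]
--     for add, sub in zip(stable[10:], stable):
--         cur += add - sub
--         out.append(cur)
--     return out
-- ===== Notes on version B (the rewrite author's own statement) =====
-- stated objective: faster
-- what changed: B replaces A's per-position re-slicing and counting of each 10-element window (and the in-place relabel pass) with a single incremental sliding-window pass that adds the entering element and subtracts the leaving one; B does not mutate its argument.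
import Mathlib
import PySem

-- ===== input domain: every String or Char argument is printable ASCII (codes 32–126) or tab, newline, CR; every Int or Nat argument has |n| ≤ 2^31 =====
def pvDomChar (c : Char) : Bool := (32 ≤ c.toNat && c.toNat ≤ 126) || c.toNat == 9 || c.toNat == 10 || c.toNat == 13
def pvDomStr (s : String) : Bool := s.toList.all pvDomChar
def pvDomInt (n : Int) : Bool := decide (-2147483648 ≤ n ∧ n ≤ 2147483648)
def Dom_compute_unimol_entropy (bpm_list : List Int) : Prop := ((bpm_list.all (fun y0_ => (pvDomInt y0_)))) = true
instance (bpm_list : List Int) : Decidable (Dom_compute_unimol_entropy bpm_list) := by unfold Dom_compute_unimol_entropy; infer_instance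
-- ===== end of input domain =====

-- B replaces A's per-position 10-slice-and-count with one incremental sliding-window pass (objective: faster).
-- Equivalence is about the RETURN value only: Python A relabels bpm_list in place, B leaves it untouched.

-- ===== PORT A =====
-- A's first loop overwrites bpm_list[i] in place; ported as the relabeled list it produces.
def compute_unimol_entropy (bpm_list : List Int) : List Int :=
  let labeled := bpm_list.map (fun b => if b ≤ 50 then (0 : Int) else if 120 ≤ b then 2 else 1)
  (PySem.List.pyRange 9 (labeled.length : Int) 1).foldl
    (fun acc i =>
      acc ++ [((PySem.List.slice labeled (some (i - 9)) (some (i + 1))).count 1 : Int)]) []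

-- ===== PORT B =====
def compute_unimol_entropy_alt (bpm_list : List Int) : List Int :=
  let stable := bpm_list.map (fun b => if 50 < b ∧ b < 120 then (1 : Int) else 0)
  if stable.length < 10 then []
  else
    let cur := (stable.take 10).sum
    (((stable.drop 10).zip stable).foldl
      (fun (st : Int × List Int) (p : Int × Int) =>
        (st.1 + p.1 - p.2, st.2 ++ [st.1 + p.1 - p.2]))
      (cur, [cur])).2

-- ===== PRECONDITION & SPEC =====
def Spec_compute_unimol_entropy (bpm_list : List Int) (out : List Int) : Prop := out = compute_unimol_entropy_alt bpm_list
instance (bpm_list : List Int) (out : List Int) : Decidable (Spec_compute_unimol_entropy bpm_list out) := by unfold Spec_compute_unimol_entropy; infer_instance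

-- ===== CLAIM (what is proved, stated in full; the proofs are below) =====
def Claim_equal_compute_unimol_entropy : Prop := ∀ (bpm_list : List Int), Dom_compute_unimol_entropy bpm_list → Spec_compute_unimol_entropy bpm_list (compute_unimol_entropy bpm_list)

-- ===== LEMMAS AND PROOFS =====

-- counts of 1s in every 10-window, as a recursion on the list: the common midpoint of both proofs
def winCounts (l : List Int) : List Int :=
  if h : l.length < 10 then [] else ((l.take 10).count 1 : Int) :: winCounts l.tail
termination_by l.length
decreasing_by
  simp only [List.length_tail]
  omega

lemma winCounts_eq_map (l : List Int) :
    winCounts l = (List.range (l.length - 9)).map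
      (fun k => (((l.drop k).take 10).count 1 : Int)) := by
  induction l using winCounts.induct with
  | case1 l h =>
    rw [winCounts]
    have h0 : l.length - 9 = 0 := by omega
    simp [h, h0]
  | case2 l h ih =>
    rw [winCounts, dif_neg h]
    have hl : l.length - 9 = (l.length - 10) + 1 := by omega
    have htl : l.tail.length - 9 = l.length - 10 := by
      simp only [List.length_tail]; omega
    rw [hl, List.range_succ_eq_map, List.map_cons, List.map_map, ih, htl]
    simp only [List.drop_zero]
    congr 1
    apply List.map_congr_left
    intro k _
    have hd : l.drop (k + 1) = l.tail.drop k := by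
      rw [← List.drop_one, List.drop_drop, Nat.add_comm]
    simp only [Function.comp_apply, Nat.succ_eq_add_one, hd]

lemma foldl_step_out (ps : List (Int × Int)) (st : Int × List Int) :
    (ps.foldl (fun (st : Int × List Int) (p : Int × Int) =>
        (st.1 + p.1 - p.2, st.2 ++ [st.1 + p.1 - p.2])) st).2
      = st.2 ++ (ps.foldl (fun (st : Int × List Int) (p : Int × Int) =>
        (st.1 + p.1 - p.2, st.2 ++ [st.1 + p.1 - p.2])) (st.1, [])).2 := by
  induction ps generalizing st with
  | nil => simp
  | cons p ps ih =>
    simp only [List.foldl_cons]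
    rw [ih (st.1 + p.1 - p.2, st.2 ++ [st.1 + p.1 - p.2]),
      ih (st.1 + p.1 - p.2, [] ++ [st.1 + p.1 - p.2])]
    simp

lemma sum01 (s : List Int) (h : ∀ x ∈ s, x = 0 ∨ x = 1) :
    s.sum = ((s.count 1 : Nat) : Int) := by
  induction s with
  | nil => simp
  | cons x t ih =>
    have hx := h x (by simp)
    have ih' := ih (fun y hy => h y (by simp [hy]))
    simp only [List.sum_cons, List.count_cons, ih']
    rcases hx with hx | hx <;> subst hx <;> simp [Int.add_comm]

lemma countShift (x : Int) (t : List Int) (h01 : ∀ y ∈ x :: t, y = 0 ∨ y = 1)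
    (h9 : 9 < t.length) :
    (((x :: t).take 10).count 1 : Int) + t[9] - x = ((t.take 10).count 1 : Int) := by
  have hx := h01 x (by simp)
  have ht9 := h01 t[9] (by simp [List.getElem_mem])
  have e1 : (x :: t).take 10 = x :: t.take 9 := rfl
  have e2 : t.take 10 = t.take 9 ++ [t[9]] := by
    rw [show (10:Nat) = 9 + 1 from rfl, List.take_add_one, List.getElem?_eq_getElem h9]
    rfl
  rw [e1, e2]
  simp only [List.count_cons, List.count_append]
  push_cast
  rcases hx with hx | hx <;> rcases ht9 with h9e | h9e <;>
    simp [hx, h9e]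

lemma winB_fold (l : List Int) (h01 : ∀ x ∈ l, x = 0 ∨ x = 1) (hlen : 10 ≤ l.length) :
    (((l.drop 10).zip l).foldl (fun (st : Int × List Int) (p : Int × Int) =>
        (st.1 + p.1 - p.2, st.2 ++ [st.1 + p.1 - p.2]))
      ((((l.take 10).count 1 : Nat) : Int), [(((l.take 10).count 1 : Nat) : Int)])).2
      = winCounts l := by
  induction l with
  | nil => simp at hlen
  | cons x t ih =>
    have hnot : ¬ ((x :: t).length < 10) := by omega
    by_cases ht : t.length < 10
    · have h9 : t.length = 9 := by simp at hlen; omega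
      have hdrop : (x :: t).drop 10 = [] := by
        rw [List.drop_succ_cons]
        exact List.drop_eq_nil_iff.mpr (by omega)
      rw [hdrop]
      rw [winCounts, dif_neg hnot]
      simp only [List.tail_cons]
      rw [winCounts, dif_pos ht]
      simp
    · have h9lt : 9 < t.length := by omega
      have hdrop : (x :: t).drop 10 = t[9] :: t.drop 10 := by
        rw [List.drop_succ_cons]; exact List.drop_eq_getElem_cons h9lt
      rw [hdrop]
      simp only [List.zip_cons_cons, List.foldl_cons]
      have hshift := countShift x t h01 h9lt
      have ih' := ih (fun y hy => h01 y (by simp [hy])) (by omega)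
      rw [foldl_step_out] at ih'
      simp only [List.singleton_append] at ih'
      rw [winCounts]
      simp only [dif_neg hnot, List.tail_cons]
      rw [hshift, foldl_step_out]
      simp only [List.cons_append, List.nil_append]
      rw [← ih']

lemma winA (bpm : List Int) :
    compute_unimol_entropy bpm
      = winCounts (bpm.map (fun b => if b ≤ 50 then (0 : Int) else if 120 ≤ b then 2 else 1)) := by
  unfold compute_unimol_entropy
  rw [PySem.List.foldl_append_singleton_eq_map, PySem.List.pyRange_one, List.map_map,
    winCounts_eq_map]
  have hlen : (((bpm.map (fun b => if b ≤ 50 then (0 : Int) else if 120 ≤ b then 2 else 1)).length : Int) - 9).toNat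
      = (bpm.map (fun b => if b ≤ 50 then (0 : Int) else if 120 ≤ b then 2 else 1)).length - 9 := by
    omega
  rw [hlen]
  apply List.map_congr_left
  intro k _
  have e1 : (9 : Int) + (k : Int) - 9 = (k : Int) := by ring
  have e2 : (9 : Int) + (k : Int) + 1 = (k : Int) + ((10 : Nat) : Int) := by push_cast; ring
  simp only [Function.comp, e1, e2, PySem.List.slice_natCast_add]

lemma winB (bpm : List Int) :
    compute_unimol_entropy_alt bpm
      = winCounts (bpm.map (fun b => if 50 < b ∧ b < 120 then (1 : Int) else 0)) := by
  unfold compute_unimol_entropy_alt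
  set stable := bpm.map (fun b => if 50 < b ∧ b < 120 then (1 : Int) else 0) with hs
  have h01 : ∀ x ∈ stable, x = 0 ∨ x = 1 := by
    intro x hx
    rw [hs] at hx
    simp only [List.mem_map] at hx
    obtain ⟨b, _, hb⟩ := hx
    split_ifs at hb <;> omega
  by_cases h : stable.length < 10
  · rw [winCounts]; simp [h]
  · simp only [h, if_false]
    have hsum : (stable.take 10).sum = (((stable.take 10).count 1 : Nat) : Int) :=
      sum01 _ (fun y hy => h01 y (List.mem_of_mem_take hy))
    rw [hsum, winB_fold stable h01 (by omega)]

lemma count_map_eq (w : List Int) :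
    ((w.map (fun b => if b ≤ 50 then (0 : Int) else if 120 ≤ b then 2 else 1)).count 1)
      = ((w.map (fun b => if 50 < b ∧ b < 120 then (1 : Int) else 0)).count 1) := by
  induction w with
  | nil => rfl
  | cons x t ih =>
    simp only [List.map_cons, List.count_cons, ih]
    split_ifs <;> simp_all <;> omega

-- ===== VERDICT (by name: the statement is the Claim_ definition above) =====
theorem compute_unimol_entropy_spec : Claim_equal_compute_unimol_entropy := by
  intro bpm _
  unfold Spec_compute_unimol_entropy
  rw [winA, winB, winCounts_eq_map, winCounts_eq_map]
  simp only [List.length_map]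
  apply List.map_congr_left
  intro k _
  simp only [← List.map_drop, ← List.map_take, count_map_eq]
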